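-- pv_equiv track=rewrite | github.com/parasiitism/AlgoDaily | leetcode/1717-maximum-score-from-removing-substrings/main.py | removeAB
-- ===== SOURCE A (Python) =====
-- def removeAB(seq, x):
--     res = 0
--     q = []
--     for c in seq:
--         if len(q) > 0 and q[-1] == 'a' and c == 'b':
--             q.pop()
--             res += x
--         else:
--             q.append(c)
--     return q, res
-- ===== SOURCE B (Python) =====
-- def removeAB(seq, x):
--     res = 0
--     l = list(seq)
--     while True:
--         found = -1
--         for i in range(len(l) - 1):
--             if l[i] == 'a' and l[i + 1] == 'b':
--                 found = i
--                 break
--         if found < 0: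
--             return l, res
--         del l[found:found + 2]
--         res += x
-- ===== Notes on version B (the rewrite author's own statement) =====
-- stated objective: alternative
-- what changed: Replaces the single-pass stack with repeated whole-list scanning: find the first adjacent 'a','b' pair, delete both and add x, restarting until no pair remains (equivalent by confluence of adjacent ab-removal).
import Mathlib
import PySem

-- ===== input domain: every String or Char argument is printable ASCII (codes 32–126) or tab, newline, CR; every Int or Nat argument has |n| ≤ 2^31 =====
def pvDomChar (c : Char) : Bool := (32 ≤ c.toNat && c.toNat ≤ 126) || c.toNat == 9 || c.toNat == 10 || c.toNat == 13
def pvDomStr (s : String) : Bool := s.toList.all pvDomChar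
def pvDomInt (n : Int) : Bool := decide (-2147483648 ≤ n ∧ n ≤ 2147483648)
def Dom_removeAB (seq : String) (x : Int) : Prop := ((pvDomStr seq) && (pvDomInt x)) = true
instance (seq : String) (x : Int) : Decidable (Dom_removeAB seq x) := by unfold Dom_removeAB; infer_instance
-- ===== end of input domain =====

-- B replaces A's single-pass stack by repeated first-adjacent-"ab"-pair deletion (alternative algorithm; equal by confluence).
-- ===== PORT A =====
-- one pass over the characters with an explicit stack q; score res grows by x per pop
def stepA (x : Int) (st : List String × Int) (c : String) : List String × Int :=
  if st.1.length > 0 ∧ st.1.getLast? = some "a" ∧ c = "b" then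
    (st.1.dropLast, st.2 + x)
  else
    (st.1 ++ [c], st.2)

def removeAB (seq : String) (x : Int) : List String × Int :=
  List.foldl (stepA x) ([], 0) (seq.toList.map Char.toString)


-- ===== PORT B =====
-- B: repeatedly scan the whole list for the FIRST adjacent "a","b" pair, delete both, add x, restart
def findPair : List String → Option Nat
  | a :: b :: t => if a = "a" ∧ b = "b" then some 0 else (findPair (b :: t)).map (· + 1)
  | _ => none

theorem findPair_lt {l : List String} {i : Nat} (h : findPair l = some i) : i + 2 ≤ l.length := by
  induction l generalizing i with
  | nil => simp [findPair] at h
  | cons a t ih =>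
    cases t with
    | nil => simp [findPair] at h
    | cons b u =>
      simp only [findPair] at h
      split at h
      · cases h; simp
      · rcases Option.map_eq_some_iff.mp h with ⟨j, hj, rfl⟩
        have := ih hj
        simp at this ⊢
        omega

def reduceLoop (x : Int) (l : List String) (acc : Int) : List String × Int :=
  match _hfp : findPair l with
  | none => (l, acc)
  | some i => reduceLoop x (l.take i ++ l.drop (i + 2)) (acc + x)
termination_by l.length
decreasing_by
  have h2 := findPair_lt _hfp
  simp [List.length_take, List.length_drop]
  omega

def removeAB_alt (seq : String) (x : Int) : List String × Int :=
  reduceLoop x (seq.toList.map Char.toString) 0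


-- ===== PRECONDITION & SPEC =====
def Spec_removeAB (seq : String) (x : Int) (out : List String × Int) : Prop := out = removeAB_alt seq x
instance (seq : String) (x : Int) (out : List String × Int) : Decidable (Spec_removeAB seq x out) := by unfold Spec_removeAB; infer_instance

-- ===== CLAIM (what is proved, stated in full; the proofs are below) =====
def Claim_equal_removeAB : Prop := ∀ (seq : String) (x : Int), Dom_removeAB seq x → Spec_removeAB seq x (removeAB seq x)

-- ===== LEMMAS AND PROOFS =====


-- score-shift: stepA's branch ignores the score, which is only ever incremented
theorem foldl_stepA_shift (x : Int) (v : List String) : ∀ (q : List String) (r d : Int),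
    List.foldl (stepA x) (q, r + d) v = ((List.foldl (stepA x) (q, r) v).1, (List.foldl (stepA x) (q, r) v).2 + d) := by
  induction v with
  | nil => intro q r d; simp
  | cons c t ih =>
    intro q r d
    simp only [List.foldl_cons, stepA]
    split <;> simp only [ih] <;> ring_nf

theorem findPair_append_pair (u v : List String) : findPair (u ++ "a" :: "b" :: v) ≠ none := by
  induction u with
  | nil => simp [findPair]
  | cons c u ih =>
    cases hu : u ++ "a" :: "b" :: v with
    | nil => simp at hu
    | cons h t =>
      simp only [List.cons_append, hu, findPair]
      split
      · simp
      · rw [← hu]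
        intro hmap
        exact ih (Option.map_eq_none_iff.mp hmap)

-- a pair-free suffix is pushed verbatim
theorem foldl_stepA_noPair (x : Int) : ∀ (l q : List String) (r : Int),
    findPair (q ++ l) = none → List.foldl (stepA x) (q, r) l = (q ++ l, r) := by
  intro l
  induction l with
  | nil => intro q r _; simp
  | cons c t ih =>
    intro q r hnp
    simp only [List.foldl_cons, stepA]
    split
    · rename_i hc
      obtain ⟨hq, hlast, hb⟩ := hc
      exfalso
      rcases List.getLast?_eq_some_iff.mp hlast with ⟨q', hqe⟩
      rw [hqe, hb] at hnp
      exact findPair_append_pair q' t (by simpa using hnp)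
    · have := ih (q ++ [c]) r (by simpa using hnp)
      simpa using this

-- the composite push-'a'-then-pop-'b' is a pure score bump
theorem stepA_ab (x : Int) (q : List String) (r : Int) :
    stepA x (stepA x (q, r) "a") "b" = (q, r + x) := by
  simp [stepA]

theorem findPair_decomp {l : List String} {i : Nat} (h : findPair l = some i) :
    l = l.take i ++ "a" :: "b" :: l.drop (i + 2) := by
  induction l generalizing i with
  | nil => simp [findPair] at h
  | cons a t ih =>
    cases t with
    | nil => simp [findPair] at h
    | cons b u =>
      simp only [findPair] at h
      split at h
      · rename_i hab
        cases h
        simp [hab.1, hab.2]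
      · rcases Option.map_eq_some_iff.mp h with ⟨j, hj, rfl⟩
        have := ih hj
        calc a :: b :: u = a :: ((b :: u).take j ++ "a" :: "b" :: (b :: u).drop (j + 2)) := by rw [← this]
          _ = _ := by simp [List.take_succ_cons, List.drop_succ_cons]

theorem foldl_stepA_pair (x : Int) (u v : List String) :
    List.foldl (stepA x) ([], 0) (u ++ "a" :: "b" :: v)
      = ((List.foldl (stepA x) ([], 0) (u ++ v)).1, (List.foldl (stepA x) ([], 0) (u ++ v)).2 + x) := by
  rw [List.foldl_append, List.foldl_append, List.foldl_cons, List.foldl_cons]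
  have h1 : stepA x (stepA x (List.foldl (stepA x) ([], 0) u) "a") "b"
      = ((List.foldl (stepA x) ([], 0) u).1, (List.foldl (stepA x) ([], 0) u).2 + x) :=
    stepA_ab x _ _
  rw [h1]
  exact foldl_stepA_shift x v _ _ x

theorem reduceLoop_eq_foldl (x : Int) : ∀ (l : List String) (acc : Int),
    reduceLoop x l acc =
      ((List.foldl (stepA x) ([], 0) l).1, acc + (List.foldl (stepA x) ([], 0) l).2) := by
  intro l
  induction hn : l.length using Nat.strong_induction_on generalizing l with
  | _ n ih =>
    intro acc
    rw [reduceLoop]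
    split
    · rename_i hfp
      have := foldl_stepA_noPair x l [] 0 (by simpa using hfp)
      simp [this]
    · rename_i i hfp
      subst hn
      have hlt := findPair_lt hfp
      have hlen : (l.take i ++ l.drop (i + 2)).length < l.length := by
        simp [List.length_take, List.length_drop]; omega
      rw [ih _ hlen _ rfl]
      have hdec := findPair_decomp hfp
      conv_rhs => rw [hdec, foldl_stepA_pair]
      simp only [Prod.mk.injEq, true_and]
      ring

theorem removeAB_spec : Claim_equal_removeAB := by
  intro seq x _
  unfold Spec_removeAB removeAB removeAB_alt
  rw [reduceLoop_eq_foldl]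
  simp
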